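-- pv_equiv track=rewrite | github.com/kylestephens-labs/fund_signal | tools/verify_feedback_resolver.py | choose_span
-- ===== SOURCE A (Python) =====
-- from collections.abc import Mapping, Sequence
--
-- def choose_span(span_domains: Mapping[str, set[str]]) -> tuple[str, set[str]] | None:
--     candidates = [
--         (span, domains)
--         for span, domains in span_domains.items()
--         if len(domains) >= 2
--     ]
--     if not candidates:
--         return None
--     return min(candidates, key=_span_rank)
--
-- def _span_rank(entry: tuple[str, set[str]]) -> tuple[int, int, str]:
--     span, domains = entry
--     # Use negatives so min() prefers higher domain count, fewer tokens, then lexicographic ascending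
--     return (-len(domains), len(span.split()), span.lower() or "")
-- ===== SOURCE B (Python) =====
-- def choose_span(span_domains):
--     # Staged narrowing: filter to >=2 domains, then successively keep only the
--     # entries winning each criterion (most domains, fewest tokens, smallest
--     # lowercase span) and return the first survivor.
--     pool = [(s, d) for s, d in span_domains.items() if len(d) >= 2]
--     if not pool:
--         return None
--     top = max(len(d) for _, d in pool)
--     pool = [(s, d) for s, d in pool if len(d) == top]
--     few = min(len(s.split()) for s, _ in pool)
--     pool = [(s, d) for s, d in pool if len(s.split()) == few]
--     low = min(s.lower() for s, _ in pool)
--     for s, d in pool: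
--         if s.lower() == low:
--             return (s, d)
-- ===== Notes on version B (the rewrite author's own statement) =====
-- stated objective: alternative
-- what changed: B replaces A's single min() with a tuple key by staged narrowing: it computes the best value of each criterion separately (max domain count, then min token count among those, then min lowercase span) and filters the candidate pool three times, returning the first survivor of the last stage; no tuple key or min-by-key exists in B.
import Mathlib
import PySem

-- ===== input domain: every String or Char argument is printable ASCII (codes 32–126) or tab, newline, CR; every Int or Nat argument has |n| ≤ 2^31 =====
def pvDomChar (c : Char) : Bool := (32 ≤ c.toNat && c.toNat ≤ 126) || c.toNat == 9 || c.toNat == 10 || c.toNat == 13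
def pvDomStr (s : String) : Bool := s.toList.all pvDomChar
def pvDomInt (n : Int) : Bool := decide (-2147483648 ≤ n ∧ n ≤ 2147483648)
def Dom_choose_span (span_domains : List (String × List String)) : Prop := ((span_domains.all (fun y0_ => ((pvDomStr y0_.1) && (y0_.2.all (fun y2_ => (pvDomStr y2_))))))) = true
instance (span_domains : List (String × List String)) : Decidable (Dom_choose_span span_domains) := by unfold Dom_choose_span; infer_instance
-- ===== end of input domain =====

-- B replaces A's one-pass min() with a tuple key by staged narrowing: it computes each
-- criterion's best value separately and filters the pool three times, returning the first
-- survivor (objective: alternative decomposition, no speed claim).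

-- ===== PORT A =====
-- Python `<` on the key tuple (Int, Int, String), lexicographic
def lexLt (a b : Int × Int × String) : Bool :=
  decide (a.1 < b.1 ∨ (a.1 = b.1 ∧ (a.2.1 < b.2.1 ∨ (a.2.1 = b.2.1 ∧ a.2.2 < b.2.2))))

-- _span_rank: (-len(domains), len(span.split()), span.lower() or "")
def spanRank (entry : String × List String) : Int × Int × String :=
  (-(entry.2.length : Int), ((PySem.Str.split₀ entry.1).length : Int),
   (let l := PySem.Str.lower entry.1; if l = "" then "" else l))

-- min(candidates, key=_span_rank): first-minimum scan (min keeps the earlier element on ties)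
def choose_span (span_domains : List (String × List String)) : Option (String × List String) :=
  let candidates := span_domains.filter (fun p => 2 ≤ p.2.length)
  match candidates with
  | [] => none
  | c :: cs => some (cs.foldl (fun m x => if lexLt (spanRank x) (spanRank m) then x else m) c)

-- ===== PORT B =====
-- staged narrowing; Python's max(...)/min(...) over a nonempty sequence are PySem.List.max?/min?
-- with the identity key (the `| none => none` arms are the totality guards for the empty pool,
-- where the Python already returned None, and for the provably unreachable later stages)
def choose_span_alt (span_domains : List (String × List String)) : Option (String × List String) :=
  let pool := span_domains.filter (fun p => 2 ≤ p.2.length)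
  match PySem.List.max? (pool.map (fun p => (p.2.length : Int))) (fun y => y) with
  | none => none                        -- `if not pool: return None`
  | some top =>
    let pool2 := pool.filter (fun p => (p.2.length : Int) == top)
    match PySem.List.min? (pool2.map (fun p => ((PySem.Str.split₀ p.1).length : Int))) (fun y => y) with
    | none => none
    | some few =>
      let pool3 := pool2.filter (fun p => ((PySem.Str.split₀ p.1).length : Int) == few)
      match PySem.List.min? (pool3.map (fun p => PySem.Str.lower p.1)) (fun y => y) with
      | none => none
      | some low => pool3.find? (fun p => PySem.Str.lower p.1 == low)

-- ===== PRECONDITION & SPEC =====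
def Spec_choose_span (span_domains : List (String × List String)) (out : Option (String × List String)) : Prop := out = choose_span_alt span_domains
instance (span_domains : List (String × List String)) (out : Option (String × List String)) : Decidable (Spec_choose_span span_domains out) := by unfold Spec_choose_span; infer_instance

-- ===== CLAIM (what is proved, stated in full; the proofs are below) =====
def Claim_equal_choose_span : Prop := ∀ (span_domains : List (String × List String)), Dom_choose_span span_domains → Spec_choose_span span_domains (choose_span span_domains)

-- ===== LEMMAS AND PROOFS =====

theorem lexLt_irrefl (a : Int × Int × String) : lexLt a a = false := by
  simp [lexLt]

theorem lexLt_ne {a b : Int × Int × String} (h : lexLt a b = true) : a ≠ b := by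
  rintro rfl; rw [lexLt_irrefl] at h; exact Bool.false_ne_true h

-- strict transitivity of the lexicographic order
theorem lexLt_lt_trans {a b c : Int × Int × String}
    (h1 : lexLt a b = true) (h2 : lexLt b c = true) : lexLt a c = true := by
  simp only [lexLt, decide_eq_true_eq] at *
  rcases h1 with h1 | ⟨e1, h1⟩ <;> rcases h2 with h2 | ⟨e2, h2⟩
  · exact Or.inl (by omega)
  · exact Or.inl (by omega)
  · exact Or.inl (by omega)
  · refine Or.inr ⟨by omega, ?_⟩
    rcases h1 with h1 | ⟨f1, h1⟩ <;> rcases h2 with h2 | ⟨f2, h2⟩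
    · exact Or.inl (by omega)
    · exact Or.inl (by omega)
    · exact Or.inl (by omega)
    · exact Or.inr ⟨by omega, lt_trans h1 h2⟩

theorem lexLt_asymm {a b : Int × Int × String} (h : lexLt a b = true) : lexLt b a = false := by
  cases h2 : lexLt b a
  · rfl
  · exact absurd (lexLt_lt_trans h h2) (by simp [lexLt_irrefl])

-- ≤-transitivity, in `= false` form: a ≤ b and b ≤ c give a ≤ c
theorem lexLt_le_trans {a b c : Int × Int × String}
    (h1 : lexLt b a = false) (h2 : lexLt c b = false) : lexLt c a = false := by
  simp only [lexLt, decide_eq_false_iff_not] at *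
  push_neg at *
  obtain ⟨p1, p2⟩ := h1
  obtain ⟨q1, q2⟩ := h2
  refine ⟨by omega, ?_⟩
  intro hca
  have hba : b.1 = a.1 := by omega
  have hcb : c.1 = b.1 := by omega
  obtain ⟨p3, p4⟩ := p2 hba
  obtain ⟨q3, q4⟩ := q2 hcb
  refine ⟨le_trans p3 q3, ?_⟩
  intro hca2
  have hba2 : b.2.1 = a.2.1 := by omega
  have hcb2 : c.2.1 = b.2.1 := by omega
  exact le_trans (p4 hba2) (q4 hcb2)

-- M ≤ x and x < m give M < m
theorem lexLt_lt_of_le_of_lt {x M m : Int × Int × String}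
    (hxM : lexLt x M = false) (hxm : lexLt x m = true) : lexLt M m = true := by
  cases h : lexLt M m
  · exact absurd (lexLt_le_trans h hxM) (by simp [hxm])
  · rfl

-- component consequences of `¬ (k x < k M)` (i.e. k M ≤ k x)
theorem lexLt_false_fst {a b : Int × Int × String} (h : lexLt a b = false) : b.1 ≤ a.1 := by
  simp only [lexLt, decide_eq_false_iff_not] at h; push_neg at h; exact h.1

theorem lexLt_false_snd {a b : Int × Int × String} (h : lexLt a b = false)
    (e : a.1 = b.1) : b.2.1 ≤ a.2.1 := by
  simp only [lexLt, decide_eq_false_iff_not] at h; push_neg at h; exact (h.2 e).1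

theorem lexLt_false_trd {a b : Int × Int × String} (h : lexLt a b = false)
    (e1 : a.1 = b.1) (e2 : a.2.1 = b.2.1) : b.2.2 ≤ a.2.2 := by
  simp only [lexLt, decide_eq_false_iff_not] at h; push_neg at h; exact (h.2 e1).2 e2

-- characterization of A's first-minimum scan
theorem scan_props : ∀ (t : List (String × List String)) (m : String × List String),
    (lexLt (spanRank m) (spanRank (t.foldl (fun m x => if lexLt (spanRank x) (spanRank m) then x else m) m)) = false) ∧
    (∀ x ∈ t, lexLt (spanRank x) (spanRank (t.foldl (fun m x => if lexLt (spanRank x) (spanRank m) then x else m) m)) = false) ∧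
    ((t.foldl (fun m x => if lexLt (spanRank x) (spanRank m) then x else m) m) = m ∨
      (lexLt (spanRank (t.foldl (fun m x => if lexLt (spanRank x) (spanRank m) then x else m) m)) (spanRank m) = true ∧
       t.find? (fun x => decide (spanRank x = spanRank (t.foldl (fun m x => if lexLt (spanRank x) (spanRank m) then x else m) m))) =
         some (t.foldl (fun m x => if lexLt (spanRank x) (spanRank m) then x else m) m))) := by
  intro t
  induction t with
  | nil =>
    intro m
    exact ⟨lexLt_irrefl _, by simp, Or.inl rfl⟩
  | cons x t ih =>
    intro m
    simp only [List.foldl_cons]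
    by_cases hx : lexLt (spanRank x) (spanRank m) = true
    · have hstep : (if lexLt (spanRank x) (spanRank m) then x else m) = x := if_pos hx
      simp only [hstep]
      obtain ⟨h1, h2, h3⟩ := ih x
      refine ⟨lexLt_asymm (lexLt_lt_of_le_of_lt h1 hx), ?_, ?_⟩
      · intro y hy
        rcases List.mem_cons.mp hy with rfl | hy
        · exact h1
        · exact h2 y hy
      · rcases h3 with hMx | ⟨hlt, hfind⟩
        · refine Or.inr ⟨by rw [hMx]; exact hx, ?_⟩
          rw [List.find?_cons_of_pos (by rw [hMx]; simp), hMx]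
        · refine Or.inr ⟨lexLt_lt_trans hlt hx, ?_⟩
          · -- head does not match: spanRank x ≠ spanRank M since M < x
            rw [List.find?_cons_of_neg (by
              simp only [decide_eq_true_eq]
              by_cases he : spanRank x = spanRank (t.foldl (fun m x => if lexLt (spanRank x) (spanRank m) then x else m) x)
              · exfalso; exact lexLt_ne hlt he.symm
              · simp [he])]
            exact hfind
    · have hstep : (if lexLt (spanRank x) (spanRank m) then x else m) = m := if_neg hx
      simp only [hstep]
      have hx' : lexLt (spanRank x) (spanRank m) = false := by
        cases h : lexLt (spanRank x) (spanRank m)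
        · rfl
        · exact absurd h hx
      obtain ⟨h1, h2, h3⟩ := ih m
      refine ⟨h1, ?_, ?_⟩
      · intro y hy
        rcases List.mem_cons.mp hy with rfl | hy
        · exact lexLt_le_trans h1 hx'
        · exact h2 y hy
      · rcases h3 with hMm | ⟨hlt, hfind⟩
        · exact Or.inl hMm
        · refine Or.inr ⟨hlt, ?_⟩
          rw [List.find?_cons_of_neg (by
            simp only [decide_eq_true_eq]
            by_cases he : spanRank x = spanRank (t.foldl (fun m x => if lexLt (spanRank x) (spanRank m) then x else m) m)
            · exfalso
              rw [← he] at hlt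
              exact absurd hlt (by simp [hx'])
            · simp [he])]
          exact hfind

-- find? over a filter collapses to find? with the conjoined predicate
theorem find?_filter_eq {α : Type} (l : List α) (q p : α → Bool) :
    (l.filter q).find? p = l.find? (fun x => q x && p x) := by
  induction l with
  | nil => rfl
  | cons a l ih =>
    by_cases hq : q a = true
    · by_cases hp : p a = true
      · simp [hq, List.find?_cons, hp]
      · simp only [Bool.not_eq_true] at hp
        simp [hq, List.find?_cons, hp, ih]
    · simp only [Bool.not_eq_true] at hq
      simp [hq, ih]

-- the three components of spanRank
theorem spanRank_fst (p : String × List String) : (spanRank p).1 = -(p.2.length : Int) := rfl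
theorem spanRank_snd (p : String × List String) : (spanRank p).2.1 = ((PySem.Str.split₀ p.1).length : Int) := rfl
theorem spanRank_trd (p : String × List String) : (spanRank p).2.2 = PySem.Str.lower p.1 := by
  show (let l := PySem.Str.lower p.1; if l = "" then "" else l) = PySem.Str.lower p.1
  by_cases h : PySem.Str.lower p.1 = "" <;> simp [h]

-- the conjunction of the three stage tests is exactly equality of the full key
theorem keyEq_bool (M x : String × List String) :
    (((x.2.length : Int) == (M.2.length : Int)) &&
     ((((PySem.Str.split₀ x.1).length : Int) == ((PySem.Str.split₀ M.1).length : Int)) &&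
      (PySem.Str.lower x.1 == PySem.Str.lower M.1)))
    = decide (spanRank x = spanRank M) := by
  rw [Bool.eq_iff_iff]
  simp only [Bool.and_eq_true, beq_iff_eq, decide_eq_true_eq]
  constructor
  · rintro ⟨e1, e2, e3⟩
    have f1 : (spanRank x).1 = (spanRank M).1 := by
      rw [spanRank_fst, spanRank_fst]; omega
    have f2 : (spanRank x).2.1 = (spanRank M).2.1 := by
      rw [spanRank_snd, spanRank_snd]; omega
    have f3 : (spanRank x).2.2 = (spanRank M).2.2 := by
      rw [spanRank_trd, spanRank_trd]; exact e3
    exact Prod.ext_iff.mpr ⟨f1, Prod.ext_iff.mpr ⟨f2, f3⟩⟩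
  · intro he
    have f1 := congrArg Prod.fst he
    have f2 := congrArg Prod.fst (congrArg Prod.snd he)
    have f3 := congrArg Prod.snd (congrArg Prod.snd he)
    rw [spanRank_fst, spanRank_fst] at f1
    rw [spanRank_snd, spanRank_snd] at f2
    rw [spanRank_trd, spanRank_trd] at f3
    exact ⟨by omega, by omega, f3⟩

-- ===== VERDICT (by name: the statement is the Claim_ definition above) =====
theorem choose_span_spec : Claim_equal_choose_span := by
  intro sd _
  unfold Spec_choose_span choose_span choose_span_alt
  cases hpool : sd.filter (fun p => 2 ≤ p.2.length) with
  | nil => simp [PySem.List.max?]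
  | cons c cs =>
    simp only []
    obtain ⟨h1, h2, h3⟩ := scan_props cs c
    set M := cs.foldl (fun m x => if lexLt (spanRank x) (spanRank m) then x else m) c with hM
    -- all elements of the pool are ≥ M in the lexicographic key
    have hall : ∀ x ∈ c :: cs, lexLt (spanRank x) (spanRank M) = false := by
      intro x hx
      rcases List.mem_cons.mp hx with rfl | hx
      · exact h1
      · exact h2 x hx
    have hmem : M ∈ c :: cs := by
      rcases h3 with hMc | ⟨_, hfind⟩
      · exact hMc ▸ List.mem_cons_self
      · exact List.mem_cons_of_mem _ (List.mem_of_find?_eq_some hfind)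
    have hfind : (c :: cs).find? (fun x => decide (spanRank x = spanRank M)) = some M := by
      rcases h3 with hMc | ⟨hlt, hfind⟩
      · rw [List.find?_cons_of_pos (by rw [hMc]; simp), hMc]
      · rw [List.find?_cons_of_neg (by
          simp only [decide_eq_true_eq]
          by_cases he : spanRank c = spanRank M
          · exact absurd he.symm (lexLt_ne hlt)
          · simp [he])]
        exact hfind
    -- Stage 1: the max domain count is M's
    rcases htop : PySem.List.max? ((c :: cs).map (fun p => (p.2.length : Int))) (fun y => y) with _ | top
    · exact absurd ((PySem.List.max?_eq_none_iff _ _).mp htop) (by simp)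
    have htopmem := PySem.List.max?_mem htop
    have htopmax := PySem.List.max?_isMax htop
    have htopM : top = (M.2.length : Int) := by
      obtain ⟨p, hp, hlen⟩ := List.mem_map.mp htopmem
      have hple : p.2.length ≤ M.2.length := by
        have := lexLt_false_fst (hall p hp)
        rw [spanRank_fst, spanRank_fst] at this
        omega
      have hMle : (M.2.length : Int) ≤ top :=
        htopmax _ (List.mem_map.mpr ⟨M, hmem, rfl⟩)
      omega
    subst htopM
    -- Stage 2
    set pool2 := (c :: cs).filter (fun p => (p.2.length : Int) == (M.2.length : Int)) with hp2
    have hmem2 : M ∈ pool2 := List.mem_filter.mpr ⟨hmem, by simp⟩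
    have hlen2 : ∀ p ∈ pool2, p.2.length = M.2.length := by
      intro p hp
      have := (List.mem_filter.mp hp).2
      simp only [beq_iff_eq] at this
      omega
    rcases hfew : PySem.List.min? (pool2.map (fun p => ((PySem.Str.split₀ p.1).length : Int))) (fun y => y) with _ | few
    · exact absurd (List.map_eq_nil_iff.mp ((PySem.List.min?_eq_none_iff _ _).mp hfew))
        (List.ne_nil_of_mem hmem2)
    have hfewmem := PySem.List.min?_mem hfew
    have hfewmin := PySem.List.min?_isMin hfew
    have hfewM : few = ((PySem.Str.split₀ M.1).length : Int) := by
      obtain ⟨p, hp, hlen⟩ := List.mem_map.mp hfewmem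
      have hMle : (PySem.Str.split₀ M.1).length ≤ (PySem.Str.split₀ p.1).length := by
        have h := lexLt_false_snd (hall p (List.mem_of_mem_filter hp))
          (by rw [spanRank_fst, spanRank_fst, hlen2 p hp])
        rw [spanRank_snd, spanRank_snd] at h
        omega
      have hfle : few ≤ ((PySem.Str.split₀ M.1).length : Int) :=
        hfewmin _ (List.mem_map.mpr ⟨M, hmem2, rfl⟩)
      omega
    subst hfewM
    -- Stage 3
    set pool3 := pool2.filter (fun p => ((PySem.Str.split₀ p.1).length : Int) == ((PySem.Str.split₀ M.1).length : Int)) with hp3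
    have hmem3 : M ∈ pool3 := List.mem_filter.mpr ⟨hmem2, by simp⟩
    have hsplit3 : ∀ p ∈ pool3, (PySem.Str.split₀ p.1).length = (PySem.Str.split₀ M.1).length := by
      intro p hp
      have := (List.mem_filter.mp hp).2
      simp only [beq_iff_eq] at this
      omega
    rcases hlow : PySem.List.min? (pool3.map (fun p => PySem.Str.lower p.1)) (fun y => y) with _ | low
    · exact absurd (List.map_eq_nil_iff.mp ((PySem.List.min?_eq_none_iff _ _).mp hlow))
        (List.ne_nil_of_mem hmem3)
    have hlowmem := PySem.List.min?_mem hlow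
    have hlowmin := PySem.List.min?_isMin hlow
    have hlowM : low = PySem.Str.lower M.1 := by
      obtain ⟨p, hp, hl⟩ := List.mem_map.mp hlowmem
      have hMle : PySem.Str.lower M.1 ≤ PySem.Str.lower p.1 := by
        have h := lexLt_false_trd (hall p (List.mem_of_mem_filter (List.mem_of_mem_filter hp)))
          (by rw [spanRank_fst, spanRank_fst,
                hlen2 p (List.mem_of_mem_filter hp)])
          (by rw [spanRank_snd, spanRank_snd, hsplit3 p hp])
        rw [spanRank_trd, spanRank_trd] at h
        exact h
      have hlle : low ≤ PySem.Str.lower M.1 :=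
        hlowmin _ (List.mem_map.mpr ⟨M, hmem3, rfl⟩)
      exact le_antisymm hlle (hl ▸ hMle)
    subst hlowM
    -- Stage 4: the final find? is the find? of the full key equality
    simp only [htop]
    simp only [← hp2]
    simp only [hfew]
    simp only [← hp3]
    simp only [hlow]
    simp only [hp3, hp2, find?_filter_eq, keyEq_bool]
    exact hfind.symm
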